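-- pv_equiv track=rewrite | github.com/roisinorourke/Networks | IPCalculator/main.py | valid_subnets
-- ===== SOURCE A (Python) =====
-- def num_subnets(host_bits):
--     bits = host_bits % 8 # find the leftover bits that arent in a byte of 8 ones
--     return 2 ** bits
--
-- def valid_subnets(ip, mask, host_bits): # function takes the ip address, subnet mask, and number of host bits
--     split_mask = mask.split('.') # split the subnet mask on the '.'
--     position = 0
--     subnet_mask = 0
--     while position < 4: # loop through the split subnet mask
--         if split_mask[position] != '255': # find the first element that isnt '255'
--             subnet_mask = int(split_mask[position]) # set the subnet_mask to that element
--             break # found the element so break out of the loop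
--         position += 1
--     block = 256 - subnet_mask # find the block size of each subnet
--
--     split_ip = ip.split('.') # split the ip address on the '.'
--     subnets = [] # create a list to hold the subnets
--
--     i = 0
--     while i < num_subnets(host_bits): # find how many subnets there will be and loop through the number
--         subnets.append('.'.join(split_ip)) # add the ip address to the list of subnets
--         split_ip[position] = str(int(split_ip[position]) + block) # increase the ip address by the block size
--         i += 1
--
--     return subnets, block, position # return the list of subnets, the block size, and the position of the subnet mask
-- ===== SOURCE B (Python) =====
-- def num_subnets(host_bits):
--     bits = host_bits % 8
--     return 2 ** bits
--
-- def subnet_list(fields, position, block, count):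
--     # recursively collect the addresses; the next state is built by slicing,
--     # never by mutating the current field list
--     if count == 0:
--         return []
--     nxt = fields[:position] + [str(int(fields[position]) + block)] + fields[position + 1:]
--     return ['.'.join(fields)] + subnet_list(nxt, position, block, count - 1)
--
-- def valid_subnets(ip, mask, host_bits):
--     split_mask = mask.split('.')
--     position = next((i for i, f in enumerate(split_mask[:4]) if f != '255'), 4)
--     block = 256 - (int(split_mask[position]) if position < 4 else 0)
--     subnets = subnet_list(ip.split('.'), position, block, num_subnets(host_bits))
--     return subnets, block, position
-- ===== Notes on version B (the rewrite author's own statement) =====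
-- stated objective: alternative
-- what changed: replaces A's while-scan with break by a next/enumerate first-index lookup, and A's mutate-in-place accumulator loop (repeatedly reassigning split_ip[position] and appending to a subnets list) by a recursive generator that builds each successive field list immutably from slices and conses the joined addresses front-to-back
import Mathlib
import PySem

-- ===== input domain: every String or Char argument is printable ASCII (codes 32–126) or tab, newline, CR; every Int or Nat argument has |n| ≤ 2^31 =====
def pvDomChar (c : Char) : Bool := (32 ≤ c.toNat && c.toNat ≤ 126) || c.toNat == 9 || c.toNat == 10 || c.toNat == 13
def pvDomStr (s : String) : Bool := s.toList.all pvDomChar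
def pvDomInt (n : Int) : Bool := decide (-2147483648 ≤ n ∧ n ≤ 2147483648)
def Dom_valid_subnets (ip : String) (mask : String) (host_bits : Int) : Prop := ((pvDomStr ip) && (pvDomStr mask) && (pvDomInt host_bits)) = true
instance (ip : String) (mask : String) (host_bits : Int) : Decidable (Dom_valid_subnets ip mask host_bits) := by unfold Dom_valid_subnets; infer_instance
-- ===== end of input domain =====

-- B replaces A's break-out while-scan by a first-index lookup and A's mutate-in-place
-- accumulator loop by a recursive, slice-based generator; same results, similar cost.


-- ===== PORT A =====
-- A's "while position < 4: … break" scan; none = the IndexError (short all-255 mask)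
-- or ValueError (unparseable field) A raises there.
def pvMaskScanA (sm : List String) (position : Nat) : Option (Nat × Int) :=
  if _h : position < 4 then
    match PySem.List.pyGet? sm (position : Int) with
    | none => none
    | some f =>
      if f != "255" then (PySem.Int.ofStr? f).map (fun v => (position, v))
      else pvMaskScanA sm (position + 1)
  else some (position, 0)
  termination_by 4 - position

-- A's "while i < num_subnets(host_bits)" loop: append the join, then mutate
-- split_ip[position] in place; none = IndexError/ValueError inside the loop.
def pvLoopA (block : Int) (position : Nat) : Nat → List String → List String → Option (List String)
  | 0, _, subnets => some subnets
  | n + 1, split_ip, subnets =>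
    let subnets' := subnets ++ [PySem.Str.join "." split_ip]
    match PySem.List.pyGet? split_ip (position : Int) with
    | none => none
    | some f =>
      match PySem.Int.ofStr? f with
      | none => none
      | some v =>
        -- the write index equals the read index, so the assignment cannot raise: pySetD is exact here
        pvLoopA block position n (PySem.List.pySetD split_ip (position : Int) (PySem.Int.toStr (v + block))) subnets'

def valid_subnets (ip : String) (mask : String) (host_bits : Int) : List String × Int × Int :=
  let split_mask := (PySem.Str.split? mask ".").getD []
  match pvMaskScanA split_mask 0 with
  | none => ([], 0, 0)   -- Python A raises here; outside Pre_
  | some (position, subnet_mask) =>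
    let block := 256 - subnet_mask
    let split_ip := (PySem.Str.split? ip ".").getD []
    match pvLoopA block position (2 ^ (PySem.Int.mod host_bits 8).toNat) split_ip [] with
    | none => ([], 0, 0)   -- Python A raises here; outside Pre_
    | some subnets => (subnets, block, position)

-- ===== PORT B =====
-- B's recursive subnet_list: each next state is built from slices, addresses consed front-to-back.
def pvSubnetListB (position : Nat) (block : Int) : Nat → List String → Option (List String)
  | 0, _ => some []
  | count + 1, fields =>
    match PySem.List.pyGet? fields (position : Int) with
    | none => none
    | some f =>
      match PySem.Int.ofStr? f with
      | none => none
      | some v =>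
        let nxt := PySem.List.slice fields none (some (position : Int)) ++
          [PySem.Int.toStr (v + block)] ++ PySem.List.slice fields (some ((position : Int) + 1)) none
        (pvSubnetListB position block count nxt).map (fun rest => PySem.Str.join "." fields :: rest)

def valid_subnets_alt (ip : String) (mask : String) (host_bits : Int) : List String × Int × Int :=
  let split_mask := (PySem.Str.split? mask ".").getD []
  -- next((i for i, f in enumerate(split_mask[:4]) if f != '255'), 4)
  let position := (List.findIdx? (fun f => f != "255") (PySem.List.slice split_mask none (some 4))).getD 4
  let smv : Option Int :=
    if position < 4 then
      match PySem.List.pyGet? split_mask (position : Int) with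
      | none => none
      | some f => PySem.Int.ofStr? f
    else some 0
  match smv with
  | none => ([], 0, 0)   -- Python B raises here; outside Pre_
  | some m =>
    let block := 256 - m
    match pvSubnetListB position block (2 ^ (PySem.Int.mod host_bits 8).toNat) ((PySem.Str.split? ip ".").getD []) with
    | none => ([], 0, 0)   -- Python B raises here; outside Pre_
    | some subnets => (subnets, block, position)

-- ===== PRECONDITION & SPEC =====
-- Pre_ admits exactly the inputs on which Python A returns: the mask scan must stop at a real
-- field (a short all-255 mask IndexErrors), that field and the ip field at the same position
-- must parse as ints (else ValueError), and that ip field must exist (else IndexError).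
def Pre_valid_subnets (ip : String) (mask : String) (host_bits : Int) : Prop :=
  let sm := (PySem.Str.split? mask ".").getD []
  let si := (PySem.Str.split? ip ".").getD []
  let p := (List.findIdx? (fun f => f != "255") (sm.take 4)).getD 4
  (if p < 4 then (PySem.Int.ofStr? (sm.getD p "")).isSome = true else 4 ≤ sm.length)
  ∧ p < si.length ∧ (PySem.Int.ofStr? (si.getD p "")).isSome = true
instance (ip : String) (mask : String) (host_bits : Int) : Decidable (Pre_valid_subnets ip mask host_bits) := by unfold Pre_valid_subnets; infer_instance

def pvWitness_valid_subnets : String × String × Int := ("10.0.0.0", "255.255.255.0", 2)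

def Spec_valid_subnets (ip : String) (mask : String) (host_bits : Int) (out : List String × Int × Int) : Prop := out = valid_subnets_alt ip mask host_bits
instance (ip : String) (mask : String) (host_bits : Int) (out : List String × Int × Int) : Decidable (Spec_valid_subnets ip mask host_bits out) := by unfold Spec_valid_subnets; infer_instance

-- ===== CLAIM (what is proved, stated in full; the proofs are below) =====
def Claim_equal_valid_subnets : Prop := ∀ (ip : String) (mask : String) (host_bits : Int), Dom_valid_subnets ip mask host_bits → Pre_valid_subnets ip mask host_bits → Spec_valid_subnets ip mask host_bits (valid_subnets ip mask host_bits)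

-- ===== LEMMAS AND PROOFS =====

-- A's in-place update of split_ip[position] is B's slice splice, given the index is readable.
lemma pv_set_eq_splice (fields : List String) (p : Nat) (x : String)
    (h : p < fields.length) :
    PySem.List.pySetD fields (p : Int) x =
      PySem.List.slice fields none (some (p : Int)) ++ [x] ++
        PySem.List.slice fields (some ((p : Int) + 1)) none := by
  have hc : ((p : Int) + 1) = (((p + 1 : Nat)) : Int) := by push_cast; ring
  rw [PySem.List.pySetD_natCast, PySem.List.slice_to_natCast, hc,
    PySem.List.slice_from_natCast, List.set_eq_take_cons_drop _ h]
  simp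

-- A's accumulator loop computes B's recursive list, appended to the accumulator.
lemma pv_loop_eq (block : Int) (p : Nat) :
    ∀ (n : Nat) (fields acc : List String),
      pvLoopA block p n fields acc = (pvSubnetListB p block n fields).map (acc ++ ·) := by
  intro n
  induction n with
  | zero => intro fields acc; simp [pvLoopA, pvSubnetListB]
  | succ n ih =>
    intro fields acc
    simp only [pvLoopA, pvSubnetListB]
    cases hg : PySem.List.pyGet? fields (p : Int) with
    | none => simp
    | some f =>
      cases hv : PySem.Int.ofStr? f with
      | none => simp [hv]
      | some v =>
        have hlt : p < fields.length := by
          rw [PySem.List.pyGet?_natCast] at hg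
          exact (List.getElem?_eq_some_iff.mp hg).1
        simp only [hv, ih, pv_set_eq_splice fields p _ hlt, Option.map_map]
        cases pvSubnetListB p block n (PySem.List.slice fields none (some (p : Int)) ++
          [PySem.Int.toStr (v + block)] ++ PySem.List.slice fields (some ((p : Int) + 1)) none) with
        | none => simp
        | some rest => simp

-- reading an in-range index
lemma pv_get_some (sm : List String) (pos : Nat) (h : pos < sm.length) :
    PySem.List.pyGet? sm (pos : Int) = some (sm.getD pos "") := by
  rw [PySem.List.pyGet?_natCast, List.getElem?_eq_getElem h, List.getD_eq_getElem?_getD,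
    List.getElem?_eq_getElem h, Option.getD_some]

-- A's scan stops where B's first-index lookup points (a non-'255' field exists)
lemma pv_scan_found : ∀ (k pos i : Nat) (sm : List String), 4 - pos = k → pos ≤ i → i < 4 →
    i < sm.length → (sm.getD i "" != "255") = true → (∀ j, j < i → sm.getD j "" = "255") →
    pvMaskScanA sm pos = (PySem.Int.ofStr? (sm.getD i "")).map (fun v => (i, v)) := by
  intro k
  induction k with
  | zero => intro pos i sm hk hpi hi4 _ _ _; omega
  | succ k ih =>
    intro pos i sm hk hpi hi4 hil hne hmin
    have hpos4 : pos < 4 := by omega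
    rw [pvMaskScanA, dif_pos hpos4, pv_get_some sm pos (by omega)]
    by_cases hpi' : pos = i
    · subst hpi'
      simp only [List.getD_eq_getElem?_getD] at hne
      simp [hne]
    · rw [hmin pos (by omega)]
      simpa using ih (pos + 1) i sm (by omega) (by omega) hi4 hil hne hmin

-- A's scan runs off the four all-'255' fields exactly when B's lookup defaults to 4
lemma pv_scan_none : ∀ (k pos : Nat) (sm : List String), 4 - pos = k → pos ≤ 4 →
    4 ≤ sm.length → (∀ j, j < 4 → sm.getD j "" = "255") →
    pvMaskScanA sm pos = some (4, 0) := by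
  intro k
  induction k with
  | zero =>
    intro pos sm hk hp4 _ _
    have : pos = 4 := by omega
    subst this
    rw [pvMaskScanA, dif_neg (by omega)]
  | succ k ih =>
    intro pos sm hk hp4 hlen hall
    have hpos4 : pos < 4 := by omega
    rw [pvMaskScanA, dif_pos hpos4, pv_get_some sm pos (by omega), hall pos hpos4]
    simpa using ih (pos + 1) sm (by omega) (by omega) hlen hall

-- ===== VERDICT (by name: the statement is the Claim_ definition above) =====
theorem valid_subnets_spec : Claim_equal_valid_subnets := by
  intro ip mask host_bits _ hpre
  unfold Spec_valid_subnets
  simp only [valid_subnets, valid_subnets_alt]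
  simp only [Pre_valid_subnets] at hpre
  generalize hsm : (PySem.Str.split? mask ".").getD [] = sm at *
  generalize hsi : (PySem.Str.split? ip ".").getD [] = si at *
  have hslice : PySem.List.slice sm none (some (4 : Int)) = List.take 4 sm := by
    have h4 := PySem.List.slice_to_natCast (xs := sm) (b := 4)
    norm_num at h4
    exact h4
  rw [hslice]
  obtain ⟨h1, h2, h3⟩ := hpre
  cases hfind : List.findIdx? (fun f => f != "255") (sm.take 4) with
  | some i =>
    rw [hfind] at h1 h2 h3
    obtain ⟨hil', hpi, hmin⟩ := List.findIdx?_eq_some_iff_getElem.mp hfind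
    have hlen : i < sm.length := by
      have := hil'; simp [List.length_take] at this; omega
    have hi4 : i < 4 := by
      have := hil'; simp [List.length_take] at this; omega
    have hgd : (sm.getD i "" != "255") = true := by
      rw [List.getD_eq_getElem?_getD, List.getElem?_eq_getElem hlen]
      simpa [List.getElem_take] using hpi
    have hmin' : ∀ j, j < i → sm.getD j "" = "255" := by
      intro j hj
      have := hmin j hj
      rw [List.getD_eq_getElem?_getD, List.getElem?_eq_getElem (by omega)]
      simpa [List.getElem_take] using this
    rw [pv_scan_found (4 - 0) 0 i sm rfl (by omega) hi4 hlen hgd hmin']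
    simp only [Option.getD_some] at h1 h2 h3
    rw [if_pos hi4] at h1
    obtain ⟨v, hv⟩ := Option.isSome_iff_exists.mp h1
    have hgetd : sm.getD i "" = sm[i] := by
      rw [List.getD_eq_getElem?_getD, List.getElem?_eq_getElem hlen, Option.getD_some]
    have hv' : PySem.Int.ofStr? sm[i] = some v := by rw [← hgetd]; exact hv
    simp only [hgetd, hv', Option.map_some]
    rw [pv_loop_eq]
    cases hS : pvSubnetListB i (256 - v) (2 ^ ((host_bits % 8).toNat)) si <;>
      simp [hi4, hv', hS, List.getElem?_eq_getElem hlen]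
  | none =>
    rw [hfind] at h1 h2 h3
    simp only [Option.getD_none] at h1 h2 h3
    rw [if_neg (by omega)] at h1
    have hall : ∀ j, j < 4 → sm.getD j "" = "255" := by
      intro j hj
      have := List.findIdx?_eq_none_iff.mp hfind (sm.getD j "")
        (by rw [List.getD_eq_getElem?_getD, List.getElem?_eq_getElem (by omega)]
            simp only [Option.getD_some]
            exact List.mem_take_iff_getElem.mpr ⟨j, by simp; omega, rfl⟩)
      simpa using this
    rw [pv_scan_none (4 - 0) 0 sm rfl (by omega) h1 hall]
    norm_num
    rw [pv_loop_eq]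
    cases pvSubnetListB 4 256 (2 ^ ((host_bits % 8).toNat)) si <;> simp
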